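-- pv_equiv track=rewrite | github.com/hilary-b/frequency | frequency analysis experiments/helpers.py | get_mbq
-- ===== SOURCE A (Python) =====
-- def get_mbq(t_tup):
--     t = len(t_tup)
--     dim = len(t_tup[0])
--     minima = []
--     maxima = []
--     for d in range(dim):
--         maxima.append(max([v[d] for v in t_tup]))
--         minima.append(min([v[d] for v in t_tup]))
--     return(tuple(minima),tuple(maxima))
-- ===== SOURCE B (Python) =====
-- def get_mbq(t_tup):
--     first = t_tup[0]
--     dim = len(first)
--     minima = list(first)
--     maxima = list(first)
--     for v in t_tup[1:]:
--         for d in range(dim):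
--             x = v[d]
--             if x < minima[d]:
--                 minima[d] = x
--             if maxima[d] < x:
--                 maxima[d] = x
--     return (tuple(minima), tuple(maxima))
-- ===== Notes on version B (the rewrite author's own statement) =====
-- stated objective: faster
-- what changed: Instead of 2*dim separate full scans (building a fresh column list and calling min/max for every dimension), B makes one pass over the tuples, maintaining running per-dimension minima/maxima initialized from the first tuple.
import Mathlib
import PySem

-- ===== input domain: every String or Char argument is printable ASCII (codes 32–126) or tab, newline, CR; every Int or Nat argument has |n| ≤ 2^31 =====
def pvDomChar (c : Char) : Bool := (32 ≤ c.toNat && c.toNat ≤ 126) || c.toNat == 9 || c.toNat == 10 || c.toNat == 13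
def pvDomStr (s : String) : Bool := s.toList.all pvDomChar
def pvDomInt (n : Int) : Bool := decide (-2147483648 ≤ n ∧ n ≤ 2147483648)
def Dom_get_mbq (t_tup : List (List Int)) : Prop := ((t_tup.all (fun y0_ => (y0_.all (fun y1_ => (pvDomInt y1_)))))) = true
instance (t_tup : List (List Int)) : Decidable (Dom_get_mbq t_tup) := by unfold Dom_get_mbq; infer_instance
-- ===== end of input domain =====

-- B replaces A's 2*dim per-column scans by one pass over the tuples maintaining running per-dimension extrema.

-- ===== PORT A =====
def get_mbq (t_tup : List (List Int)) : List Int × List Int :=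
  let dim : Int := ((PySem.List.pyGetD t_tup 0 ([] : List Int)).length : Int)
  (PySem.List.pyRange 0 dim 1).foldl
    (fun mm d =>
      (mm.1 ++ [(PySem.List.min? (t_tup.map (fun v => PySem.List.pyGetD v d 0)) (fun y => y)).getD 0],
       mm.2 ++ [(PySem.List.max? (t_tup.map (fun v => PySem.List.pyGetD v d 0)) (fun y => y)).getD 0]))
    ([], [])

-- ===== PORT B =====
def get_mbq_alt (t_tup : List (List Int)) : List Int × List Int :=
  let first : List Int := PySem.List.pyGetD t_tup 0 ([] : List Int)
  let dim : Int := (first.length : Int)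
  (PySem.List.slice t_tup (some 1) none).foldl
    (fun mm v =>
      (PySem.List.pyRange 0 dim 1).foldl
        (fun mm2 d =>
          ((if PySem.List.pyGetD v d 0 < PySem.List.pyGetD mm2.1 d 0 then
              PySem.List.pySetD mm2.1 d (PySem.List.pyGetD v d 0) else mm2.1),
           (if PySem.List.pyGetD mm2.2 d 0 < PySem.List.pyGetD v d 0 then
              PySem.List.pySetD mm2.2 d (PySem.List.pyGetD v d 0) else mm2.2)))
        mm)
    (first, first)

-- ===== PRECONDITION & SPEC =====
-- Pre_ excludes exactly the inputs on which the Python A raises IndexError: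
-- the empty list (t_tup[0]) and ragged inputs where some tuple is shorter than the first.
def Pre_get_mbq (t_tup : List (List Int)) : Prop :=
  t_tup ≠ [] ∧ ∀ v ∈ t_tup, (t_tup.headI).length ≤ v.length
instance (t_tup : List (List Int)) : Decidable (Pre_get_mbq t_tup) := by unfold Pre_get_mbq; infer_instance
def pvWitness_get_mbq : List (List Int) := [[1, 7], [3, -2], [0, 5]]
def Spec_get_mbq (t_tup : List (List Int)) (out : List Int × List Int) : Prop := out = get_mbq_alt t_tup
instance (t_tup : List (List Int)) (out : List Int × List Int) : Decidable (Spec_get_mbq t_tup out) := by unfold Spec_get_mbq; infer_instance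

-- ===== CLAIM (what is proved, stated in full; the proofs are below) =====
def Claim_equal_get_mbq : Prop := ∀ (t_tup : List (List Int)), Dom_get_mbq t_tup → Pre_get_mbq t_tup → Spec_get_mbq t_tup (get_mbq t_tup)

-- ===== LEMMAS AND PROOFS =====


-- helpers for the proof of pv_inner: one running-extremum update step on a partially rebuilt list
theorem pv_set_min (pre w : List Int) (n : Nat) (hp : pre.length = n) (hn : n < w.length) (x : Int) :
    (if x < PySem.List.pyGetD (pre ++ List.drop n w) (n : Int) 0 then
        PySem.List.pySetD (pre ++ List.drop n w) (n : Int) x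
      else pre ++ List.drop n w)
    = (pre ++ [min (w.getD n 0) x]) ++ List.drop (n + 1) w := by
  have hd : List.drop n w = w.getD n 0 :: List.drop (n + 1) w := by
    rw [List.drop_eq_getElem_cons hn, List.getD_eq_getElem _ _ hn]
  rw [hd]
  simp only [PySem.List.pySetD_natCast, PySem.List.pyGetD_natCast]
  generalize w.getD n 0 = y
  rw [← hp]
  have hget : (pre ++ y :: List.drop (pre.length + 1) w).getD pre.length 0 = y := by
    simp [List.getD]
  have hset : (pre ++ y :: List.drop (pre.length + 1) w).set pre.length x
      = pre ++ x :: List.drop (pre.length + 1) w := by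
    rw [List.set_append_right _ _ (le_refl _)]
    simp
  rw [hget, hset]
  by_cases h : x < y
  · rw [if_pos h, min_eq_right (le_of_lt h)]
    simp
  · rw [if_neg h, min_eq_left (le_of_not_gt h)]
    simp

theorem pv_set_max (pre w : List Int) (n : Nat) (hp : pre.length = n) (hn : n < w.length) (x : Int) :
    (if PySem.List.pyGetD (pre ++ List.drop n w) (n : Int) 0 < x then
        PySem.List.pySetD (pre ++ List.drop n w) (n : Int) x
      else pre ++ List.drop n w)
    = (pre ++ [max (w.getD n 0) x]) ++ List.drop (n + 1) w := by
  have hd : List.drop n w = w.getD n 0 :: List.drop (n + 1) w := by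
    rw [List.drop_eq_getElem_cons hn, List.getD_eq_getElem _ _ hn]
  rw [hd]
  simp only [PySem.List.pySetD_natCast, PySem.List.pyGetD_natCast]
  generalize w.getD n 0 = y
  rw [← hp]
  have hget : (pre ++ y :: List.drop (pre.length + 1) w).getD pre.length 0 = y := by
    simp [List.getD]
  have hset : (pre ++ y :: List.drop (pre.length + 1) w).set pre.length x
      = pre ++ x :: List.drop (pre.length + 1) w := by
    rw [List.set_append_right _ _ (le_refl _)]
    simp
  rw [hget, hset]
  by_cases h : y < x
  · rw [if_pos h, max_eq_right (le_of_lt h)]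
    simp
  · rw [if_neg h, max_eq_left (le_of_not_gt h)]
    simp

-- a list of length n is the table of its entries
theorem pv_map_getD (m : List Int) (n : Nat) (h : m.length = n) :
    (List.range n).map (fun k => m.getD k 0) = m := by
  subst h
  apply List.ext_getElem
  · simp
  · intro i h1 h2
    simp [List.getD, List.getElem?_eq_getElem h2]

-- A's loop: appending to both components of a pair along a list is map on each component.
theorem pv_foldl_pair_append (l : List Int) (f g : Int → Int) (a b : List Int) :
    l.foldl (fun mm d => (mm.1 ++ [f d], mm.2 ++ [g d])) (a, b) = (a ++ l.map f, b ++ l.map g) := by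
  induction l generalizing a b with
  | nil => simp
  | cons x t ih => simp [List.foldl_cons, ih]

-- B's inner index loop: updates the first n entries of both accumulators pointwise.
theorem pv_inner (v m M : List Int) (n : Nat) (hm : n ≤ m.length) (hM : n ≤ M.length) :
    (PySem.List.pyRange 0 (n : Int) 1).foldl
      (fun mm2 d =>
        ((if PySem.List.pyGetD v d 0 < PySem.List.pyGetD mm2.1 d 0 then
            PySem.List.pySetD mm2.1 d (PySem.List.pyGetD v d 0) else mm2.1),
         (if PySem.List.pyGetD mm2.2 d 0 < PySem.List.pyGetD v d 0 then
            PySem.List.pySetD mm2.2 d (PySem.List.pyGetD v d 0) else mm2.2)))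
      (m, M)
    = ((List.range n).map (fun k => min (m.getD k 0) (v.getD k 0)) ++ m.drop n,
       (List.range n).map (fun k => max (M.getD k 0) (v.getD k 0)) ++ M.drop n) := by
  induction n with
  | zero => simp [PySem.List.pyRange_one_eq_nil]
  | succ n ih =>
    have h1 : ((n + 1 : Nat) : Int) = (n : Int) + 1 := by push_cast; ring
    rw [h1, PySem.List.pyRange_one_succ_right (a := 0) (b := (n : Int)) (Int.natCast_nonneg n), List.foldl_append]
    rw [ih (by omega) (by omega)]
    simp only [List.foldl_cons, List.foldl_nil]
    rw [pv_set_min _ m n (by simp) (by omega), pv_set_max _ M n (by simp) (by omega)]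
    simp [List.range_succ, List.append_assoc]

-- column min/max of A as a fold
theorem pv_col_min (h : List Int) (tl : List (List Int)) (k : Nat) :
    (PySem.List.min? ((h :: tl).map (fun v => PySem.List.pyGetD v (k : Int) 0)) (fun y => y)).getD 0
    = tl.foldl (fun a v => min a (v.getD k 0)) (h.getD k 0) := by
  simp [PySem.List.min?_id_cons, List.foldl_map]

theorem pv_col_max (h : List Int) (tl : List (List Int)) (k : Nat) :
    (PySem.List.max? ((h :: tl).map (fun v => PySem.List.pyGetD v (k : Int) 0)) (fun y => y)).getD 0
    = tl.foldl (fun a v => max a (v.getD k 0)) (h.getD k 0) := by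
  simp [PySem.List.max?_id_cons, List.foldl_map]

-- B's outer loop: running per-dimension extrema over the remaining rows.
theorem pv_outer (n : Nat) (tl : List (List Int)) (m M : List Int)
    (hm : m.length = n) (hM : M.length = n) :
    tl.foldl
      (fun mm v =>
        (PySem.List.pyRange 0 (n : Int) 1).foldl
          (fun mm2 d =>
            ((if PySem.List.pyGetD v d 0 < PySem.List.pyGetD mm2.1 d 0 then
                PySem.List.pySetD mm2.1 d (PySem.List.pyGetD v d 0) else mm2.1),
             (if PySem.List.pyGetD mm2.2 d 0 < PySem.List.pyGetD v d 0 then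
                PySem.List.pySetD mm2.2 d (PySem.List.pyGetD v d 0) else mm2.2)))
          mm)
      (m, M)
    = ((List.range n).map (fun k => tl.foldl (fun a v => min a (v.getD k 0)) (m.getD k 0)),
       (List.range n).map (fun k => tl.foldl (fun a v => max a (v.getD k 0)) (M.getD k 0))) := by
  induction tl generalizing m M with
  | nil =>
    simp only [List.foldl_nil]
    rw [pv_map_getD m n hm, pv_map_getD M n hM]
  | cons v tl ih =>
    rw [List.foldl_cons, pv_inner v m M n (le_of_eq hm.symm) (le_of_eq hM.symm),
        List.drop_eq_nil_of_le (le_of_eq hm), List.drop_eq_nil_of_le (le_of_eq hM),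
        List.append_nil, List.append_nil, ih _ _ (by simp) (by simp)]
    refine Prod.ext ?_ ?_ <;>
      · apply List.map_congr_left
        intro k hk
        rw [List.mem_range] at hk
        rw [List.getD_eq_getElem _ _ (by simpa using hk)]
        simp [List.foldl_cons]

-- ===== VERDICT (by name: the statement is the Claim_ definition above) =====
theorem get_mbq_spec : Claim_equal_get_mbq := by
  intro t_tup _hdom hpre
  unfold Spec_get_mbq
  obtain ⟨hne, -⟩ := hpre
  cases t_tup with
  | nil => exact absurd rfl hne
  | cons h tl =>
    unfold get_mbq get_mbq_alt
    simp only [PySem.List.pyGetD_zero_cons, PySem.List.slice_from_one, List.tail_cons]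
    rw [pv_foldl_pair_append, pv_outer h.length tl h h rfl rfl]
    rw [PySem.List.pyRange_one]
    simp only [Int.sub_zero, Int.toNat_natCast, List.map_map, List.nil_append]
    refine Prod.ext ?_ ?_ <;>
      · apply List.map_congr_left
        intro k hk
        simp only [Function.comp, Int.zero_add]
        first
          | rw [pv_col_min h tl k]
          | rw [pv_col_max h tl k]
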